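-- pv_equiv track=rewrite | github.com/ye04/coding | python_practice/mogakco_problems/unqualified.py | solution
-- ===== SOURCE A (Python) =====
-- def solution(participated, qualified):
--     unqualified = []
--     for person in participated:
--         if person in qualified:
--             qualified.remove(person)
--         else:
--             unqualified.append(person)
--     return unqualified
-- ===== SOURCE B (Python) =====
-- def solution(participated, qualified):
--     need = {}
--     for q in qualified:
--         need[q] = need.get(q, 0) + 1
--     rank = {}
--     out = []
--     for p in participated:
--         r = rank.get(p, 0)
--         rank[p] = r + 1
--         if r >= need.get(p, 0):
--             out.append(p)
--     return out
-- ===== Notes on version B (the rewrite author's own statement) =====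
-- stated objective: faster
-- what changed: B never consumes a multiset: it numbers each participant's occurrences (rank dict) and keeps p iff its occurrence rank is at least the fixed count of p in qualified, replacing A's repeated linear membership test and list.remove.
import Mathlib
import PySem

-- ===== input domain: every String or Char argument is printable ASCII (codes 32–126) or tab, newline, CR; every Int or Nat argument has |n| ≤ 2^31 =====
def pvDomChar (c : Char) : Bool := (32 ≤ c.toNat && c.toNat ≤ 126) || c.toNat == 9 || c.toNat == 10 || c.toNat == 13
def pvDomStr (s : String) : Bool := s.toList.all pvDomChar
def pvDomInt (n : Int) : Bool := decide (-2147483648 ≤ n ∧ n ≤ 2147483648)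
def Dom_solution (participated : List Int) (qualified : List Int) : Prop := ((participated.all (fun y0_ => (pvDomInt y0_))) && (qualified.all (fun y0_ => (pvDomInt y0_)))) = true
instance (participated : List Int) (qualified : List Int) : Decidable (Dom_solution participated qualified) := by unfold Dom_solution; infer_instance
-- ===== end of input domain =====

-- B keeps a participant iff its occurrence rank (how many times it has appeared so far)
-- is at least the fixed count of that value in qualified — no multiset is consumed
-- (objective: faster, O(n+m) vs O(n*m)).
-- NOTE: Python A mutates its `qualified` argument in place (list.remove); B does not.
-- The equivalence proved here is about the RETURN value only.

-- ===== PORT A =====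
-- one loop over participated carrying (qualified, unqualified); `qualified.remove(person)`
-- is PySem.List.remove? — under the `person ∈ qualified` guard it is always `some`, the
-- getD fallback is never taken.
def solution (participated : List Int) (qualified : List Int) : List Int :=
  (participated.foldl
    (fun (st : List Int × List Int) person =>
      if person ∈ st.1 then
        ((PySem.List.remove? st.1 person).getD st.1, st.2)
      else
        (st.1, st.2 ++ [person]))
    (qualified, [])).2

-- ===== PORT B =====
def solution_alt (participated : List Int) (qualified : List Int) : List Int :=
  let need : PySem.Dict Int Int :=
    qualified.foldl (fun d q => d.insert q (d.getD q 0 + 1)) PySem.Dict.empty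
  (participated.foldl
    (fun (st : PySem.Dict Int Int × List Int) p =>
      let r := st.1.getD p 0
      if r ≥ need.getD p 0 then
        (st.1.insert p (r + 1), st.2 ++ [p])
      else
        (st.1.insert p (r + 1), st.2))
    (PySem.Dict.empty, [])).2

-- ===== PRECONDITION & SPEC =====
def Spec_solution (participated : List Int) (qualified : List Int) (out : List Int) : Prop := out = solution_alt participated qualified
instance (participated : List Int) (qualified : List Int) (out : List Int) : Decidable (Spec_solution participated qualified out) := by unfold Spec_solution; infer_instance

-- ===== CLAIM (what is proved, stated in full; the proofs are below) =====
def Claim_equal_solution : Prop := ∀ (participated : List Int) (qualified : List Int), Dom_solution participated qualified → Spec_solution participated qualified (solution participated qualified)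

-- ===== LEMMAS AND PROOFS =====

-- Loop invariant: A's remaining multiset `q` satisfies, for every value x,
-- (q.count x) = max (need(x) - rank(x)) 0; then both loops build the same accumulator.
theorem solution_loop_eq (ps : List Int) (q : List Int)
    (nd d : PySem.Dict Int Int) (u : List Int)
    (h : ∀ x, (q.count x : Int) = max (nd.getD x 0 - d.getD x 0) 0) :
    (ps.foldl
      (fun (st : List Int × List Int) person =>
        if person ∈ st.1 then
          ((PySem.List.remove? st.1 person).getD st.1, st.2)
        else
          (st.1, st.2 ++ [person]))
      (q, u)).2 =
    (ps.foldl
      (fun (st : PySem.Dict Int Int × List Int) p =>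
        let r := st.1.getD p 0
        if r ≥ nd.getD p 0 then
          (st.1.insert p (r + 1), st.2 ++ [p])
        else
          (st.1.insert p (r + 1), st.2))
      (d, u)).2 := by
  induction ps generalizing q d u with
  | nil => rfl
  | cons p rest ih =>
    simp only [List.foldl_cons]
    by_cases hp : p ∈ q
    · have hc : 0 < q.count p := List.count_pos_iff.mpr hp
      have hlt : ¬ d.getD p 0 ≥ nd.getD p 0 := by
        have := h p; omega
      rw [if_pos hp, if_neg hlt]
      rw [PySem.List.remove?_eq_some_erase _ _ hp]
      simp only [Option.getD_some]
      apply ih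
      intro x
      rw [PySem.Dict.getD_insert]
      by_cases hx : x = p
      · subst hx
        rw [if_pos rfl, List.count_erase_self]
        have := h x; omega
      · rw [if_neg hx, List.count_erase_of_ne hx]; exact h x
    · have hc : q.count p = 0 := List.count_eq_zero.mpr hp
      have hge : d.getD p 0 ≥ nd.getD p 0 := by
        have := h p; rw [hc] at this; push_cast at this; omega
      rw [if_neg hp, if_pos hge]
      apply ih
      intro x
      rw [PySem.Dict.getD_insert]
      by_cases hx : x = p
      · subst hx
        rw [if_pos rfl]
        have := h x; rw [hc] at this; push_cast at this ⊢; omega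
      · rw [if_neg hx]; exact h x

-- ===== VERDICT (by name: the statement is the Claim_ definition above) =====
theorem solution_spec : Claim_equal_solution := by
  intro participated qualified _
  unfold Spec_solution solution solution_alt
  exact solution_loop_eq participated qualified _ PySem.Dict.empty []
    (fun x => by
      rw [PySem.Dict.foldl_insert_getD_add_one_eq_counter, PySem.Dict.getD_counter,
        PySem.Dict.getD_empty]
      have : 0 ≤ (qualified.count x : Int) := by positivity
      omega)
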